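-- pv_equiv track=rewrite | github.com/upsightx/FreeTodo | lifetrace/memory/task_linker.py | _split_events
-- ===== SOURCE A (Python) =====
-- def _split_events(content: str) -> list[str]:
--     """Split an L2 events Markdown file into individual event blocks."""
--     blocks: list[str] = []
--     current: list[str] = []
--     for line in content.split("\n"):
--         if line.startswith("## Event:") or line.startswith("## event:"):
--             if current:
--                 blocks.append("\n".join(current).strip())
--             current = [line]
--         elif current:
--             current.append(line)
--     if current:
--         blocks.append("\n".join(current).strip())
--     return [b for b in blocks if b]
-- ===== SOURCE B (Python) =====
-- def _split_events(content: str) -> list[str]: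
--     """Split an L2 events Markdown file into individual event blocks."""
--     lines = content.split("\n")
--
--     def _is_header(line: str) -> bool:
--         return line.startswith("## Event:") or line.startswith("## event:")
--
--     out: list[str] = []
--     n = len(lines)
--     i = 0
--     while i < n and not _is_header(lines[i]):  # discard everything before the first header
--         i += 1
--     while i < n:
--         j = i + 1
--         while j < n and not _is_header(lines[j]):
--             j += 1
--         block = "\n".join(lines[i:j]).strip()
--         if block:
--             out.append(block)
--         i = j
--     return out
-- ===== Notes on version B (the rewrite author's own statement) =====
-- stated objective: alternative
-- what changed: Replaces A's single-pass running accumulator (current-block list, trailing flush, then a separate truthiness filter pass) by a group-at-a-time scan: skip the prologue before the first header, then repeatedly scan to the next header, slice off that block, strip it and keep it inline if nonempty.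
import Mathlib
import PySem

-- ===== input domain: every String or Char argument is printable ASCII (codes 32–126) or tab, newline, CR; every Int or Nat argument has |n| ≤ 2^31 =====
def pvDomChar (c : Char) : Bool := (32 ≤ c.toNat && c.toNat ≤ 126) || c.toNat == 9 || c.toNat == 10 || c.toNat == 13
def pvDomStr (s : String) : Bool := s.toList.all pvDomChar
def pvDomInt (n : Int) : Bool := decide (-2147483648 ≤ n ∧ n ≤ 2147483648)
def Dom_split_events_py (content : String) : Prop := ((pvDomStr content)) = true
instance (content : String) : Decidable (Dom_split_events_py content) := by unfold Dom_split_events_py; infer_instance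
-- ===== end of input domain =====

-- B replaces A's running-accumulator fold (trailing flush + post filter) by a group-at-a-time
-- scan: drop the prologue, then repeatedly slice off one header-led block; objective: alternative decomposition.

-- ===== PORT A =====
def pvIsHdr (line : String) : Bool :=
  PySem.Str.startswith line "## Event:" || PySem.Str.startswith line "## event:"

def pvFinish (c : List String) : String := PySem.Str.strip (PySem.Str.join "\n" c)

def pvStep (st : List String × List String) (line : String) : List String × List String :=
  if pvIsHdr line then
    ((if st.2 ≠ [] then st.1 ++ [pvFinish st.2] else st.1), [line])
  else if st.2 ≠ [] then (st.1, st.2 ++ [line])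
  else st

def pvFlush (st : List String × List String) : List String :=
  if st.2 ≠ [] then st.1 ++ [pvFinish st.2] else st.1

def split_events_py (content : String) : List String :=
  -- sep "\n" is nonempty, so Python's split never raises and split? is always `some`
  (pvFlush (((PySem.Str.split? content "\n").getD []).foldl pvStep ([], []))).filter
    (fun b => b != "")

-- ===== PORT B =====
-- first while loop of B: advance past everything before the first header
def pvDropPre : List String → List String
  | [] => []
  | l :: ls => if pvIsHdr l then l :: ls else pvDropPre ls

-- outer while loop of B: inner scan to the next header (takeWhile/dropWhile), slice, strip, keep if nonempty
def pvGroups : List String → List String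
  | [] => []
  | l :: ls =>
    let block := pvFinish (l :: ls.takeWhile (fun x => !pvIsHdr x))
    let rest := pvGroups (ls.dropWhile (fun x => !pvIsHdr x))
    if block != "" then block :: rest else rest
termination_by ls => ls.length
decreasing_by
  simpa using Nat.lt_succ_of_le (ls.length_dropWhile_le _)

def split_events_py_alt (content : String) : List String :=
  pvGroups (pvDropPre ((PySem.Str.split? content "\n").getD []))

-- ===== PRECONDITION & SPEC =====
def Spec_split_events_py (content : String) (out : List String) : Prop := out = split_events_py_alt content
instance (content : String) (out : List String) : Decidable (Spec_split_events_py content out) := by unfold Spec_split_events_py; infer_instance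

-- ===== CLAIM (what is proved, stated in full; the proofs are below) =====
def Claim_equal_split_events_py : Prop := ∀ (content : String), Dom_split_events_py content → Spec_split_events_py content (split_events_py content)

-- ===== LEMMAS AND PROOFS =====
-- the raw header-delimited groups of a line list (proof-only characterisation)
def pvG : List String → List (List String)
  | [] => []
  | l :: ls =>
    if pvIsHdr l then
      (l :: ls.takeWhile (fun x => !pvIsHdr x)) :: pvG (ls.dropWhile (fun x => !pvIsHdr x))
    else pvG ls
termination_by ls => ls.length
decreasing_by
  · simpa using Nat.lt_succ_of_le (ls.length_dropWhile_le _)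
  · simp

theorem pvG_dropWhile (ls : List String) :
    pvG (ls.dropWhile (fun x => !pvIsHdr x)) = pvG ls := by
  induction ls with
  | nil => rfl
  | cons l ls ih =>
    by_cases h : pvIsHdr l
    · simp [List.dropWhile, h]
    · simp [List.dropWhile, h, pvG, ih]

theorem pvDropPre_eq (ls : List String) :
    pvDropPre ls = ls.dropWhile (fun x => !pvIsHdr x) := by
  induction ls with
  | nil => rfl
  | cons l ls ih =>
    by_cases h : pvIsHdr l
    · simp [pvDropPre, List.dropWhile, h]
    · simp [pvDropPre, List.dropWhile, h, ih]

theorem pvFoldA (ls : List String) (blocks c : List String) :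
    pvFlush (ls.foldl pvStep (blocks, c)) =
      blocks ++ (if c = [] then (pvG ls).map pvFinish
        else pvFinish (c ++ ls.takeWhile (fun x => !pvIsHdr x)) ::
          (pvG (ls.dropWhile (fun x => !pvIsHdr x))).map pvFinish) := by
  induction ls generalizing blocks c with
  | nil =>
    by_cases hc : c = [] <;> simp [pvFlush, hc, pvG]
  | cons l ls ih =>
    by_cases h : pvIsHdr l
    · by_cases hc : c = []
      · rw [show (l :: ls).foldl pvStep (blocks, c) = ls.foldl pvStep (blocks, [l]) by
          simp [List.foldl, pvStep, h, hc]]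
        rw [ih blocks [l]]
        simp [pvG, h, hc]
      · rw [show (l :: ls).foldl pvStep (blocks, c) =
            ls.foldl pvStep (blocks ++ [pvFinish c], [l]) by
          simp [List.foldl, pvStep, h, hc]]
        rw [ih (blocks ++ [pvFinish c]) [l]]
        simp [pvG, h, hc]
    · by_cases hc : c = []
      · rw [show (l :: ls).foldl pvStep (blocks, c) = ls.foldl pvStep (blocks, c) by
          simp [List.foldl, pvStep, h, hc]]
        rw [ih blocks c]
        simp [pvG, h, hc]
      · rw [show (l :: ls).foldl pvStep (blocks, c) = ls.foldl pvStep (blocks, c ++ [l]) by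
          simp [List.foldl, pvStep, h, hc]]
        rw [ih blocks (c ++ [l])]
        simp [h, hc, List.takeWhile, List.dropWhile]

theorem pvGroups_eq_filter (ls : List String) :
    pvGroups (ls.dropWhile (fun x => !pvIsHdr x)) =
      ((pvG ls).map pvFinish).filter (fun b => b != "") := by
  induction ls with
  | nil => simp [pvGroups, pvG]
  | cons l ls ih =>
    by_cases h : pvIsHdr l
    · rw [show (l :: ls).dropWhile (fun x => !pvIsHdr x) = l :: ls by simp [List.dropWhile, h]]
      rw [pvGroups, pvG]
      simp only [h, if_pos, List.map_cons, List.filter_cons, pvG_dropWhile, ih]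
    · rw [show (l :: ls).dropWhile (fun x => !pvIsHdr x) = ls.dropWhile (fun x => !pvIsHdr x) by
        simp [List.dropWhile, h]]
      rw [ih]
      simp [pvG, h]

-- ===== VERDICT (by name: the statement is the Claim_ definition above) =====
theorem split_events_py_spec : Claim_equal_split_events_py := by
  intro content _
  unfold Spec_split_events_py split_events_py split_events_py_alt
  generalize (PySem.Str.split? content "\n").getD [] = ls
  rw [pvFoldA, pvDropPre_eq, pvGroups_eq_filter]
  simp
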